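-- pv_equiv track=rewrite | github.com/Rashiithub12/All-Internet-GTM-Job-Notifier | extract_video_attendees.py | is_likely_title_or_company
-- ===== SOURCE A (Python) =====
-- def is_likely_title_or_company(text: str) -> bool:
--     """Heuristic: check if a line looks like a job title or company."""
--     text = text.strip()
--     if not text or len(text) < 2 or len(text) > 120:
--         return False
--     title_keywords = [
--         'ceo', 'cto', 'coo', 'cfo', 'cmo', 'vp', 'director', 'manager',
--         'engineer', 'developer', 'designer', 'analyst', 'consultant',
--         'founder', 'co-founder', 'partner', 'lead', 'head', 'chief',
--         'specialist', 'coordinator', 'associate', 'intern', 'executive',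
--         'president', 'officer', 'advisor', 'strategist', 'architect',
--         'operations', 'marketing', 'sales', 'product', 'growth',
--         'revenue', 'account', 'business', 'customer', 'success',
--         'inc', 'llc', 'ltd', 'corp', 'company', 'group', 'agency',
--         'solutions', 'technologies', 'software', 'digital', 'media',
--         'at ', '@ ', '|',
--     ]
--     lower = text.lower()
--     return any(kw in lower for kw in title_keywords)
-- ===== SOURCE B (Python) =====
-- _KEYWORD_BLOB = (
--     "ceo\ncto\ncoo\ncfo\ncmo\nvp\ndirector\nmanager\n"
--     "engineer\ndeveloper\ndesigner\nanalyst\nconsultant\n"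
--     "founder\nco-founder\npartner\nlead\nhead\nchief\n"
--     "specialist\ncoordinator\nassociate\nintern\nexecutive\n"
--     "president\nofficer\nadvisor\nstrategist\narchitect\n"
--     "operations\nmarketing\nsales\nproduct\ngrowth\n"
--     "revenue\naccount\nbusiness\ncustomer\nsuccess\n"
--     "inc\nllc\nltd\ncorp\ncompany\ngroup\nagency\n"
--     "solutions\ntechnologies\nsoftware\ndigital\nmedia\n"
--     "at \n@ \n|"
-- )
--
-- # first-character index: maps a char to the keywords starting with it
-- _INDEX = {}
-- for _kw in _KEYWORD_BLOB.split("\n"):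
--     _INDEX[_kw[0]] = _INDEX.get(_kw[0], []) + [_kw]
--
--
-- def is_likely_title_or_company(text: str) -> bool:
--     """Heuristic: check if a line looks like a job title or company."""
--     t = text.strip()
--     if 2 <= len(t) <= 120:
--         lower = t.lower()
--         # walk the suffixes; at each one only try keywords whose first
--         # character matches, found via the precomputed index
--         while lower:
--             for kw in _INDEX.get(lower[0], ()):
--                 if lower.startswith(kw):
--                     return True
--             lower = lower[1:]
--     return False
-- ===== Notes on version B (the rewrite author's own statement) =====
-- stated objective: alternative
-- what changed: Replaces A's keyword-major loop of independent substring searches by a suffix-walking scan dispatched through a precomputed first-character index (dict from char to the keywords starting with it), so at each position only matching-head keywords are tried.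
import Mathlib
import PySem

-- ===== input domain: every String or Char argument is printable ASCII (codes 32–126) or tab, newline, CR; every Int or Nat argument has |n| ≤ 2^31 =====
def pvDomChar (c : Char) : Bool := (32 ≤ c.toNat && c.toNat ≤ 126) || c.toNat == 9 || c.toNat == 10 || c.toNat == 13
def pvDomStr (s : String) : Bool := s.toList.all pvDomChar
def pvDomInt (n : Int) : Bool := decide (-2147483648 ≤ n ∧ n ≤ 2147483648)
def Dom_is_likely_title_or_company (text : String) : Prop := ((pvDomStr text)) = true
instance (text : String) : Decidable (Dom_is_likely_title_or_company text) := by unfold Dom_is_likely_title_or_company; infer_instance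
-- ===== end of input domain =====

-- B replaces A's per-keyword substring loop by a suffix walk dispatched through a
-- first-character index (dict char -> keywords starting with it); objective: alternative.

-- ===== PORT A =====
def pvKeywordsA : List String := [
  "ceo", "cto", "coo", "cfo", "cmo", "vp", "director", "manager",
  "engineer", "developer", "designer", "analyst", "consultant",
  "founder", "co-founder", "partner", "lead", "head", "chief",
  "specialist", "coordinator", "associate", "intern", "executive",
  "president", "officer", "advisor", "strategist", "architect",
  "operations", "marketing", "sales", "product", "growth",
  "revenue", "account", "business", "customer", "success",
  "inc", "llc", "ltd", "corp", "company", "group", "agency",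
  "solutions", "technologies", "software", "digital", "media",
  "at ", "@ ", "|"]

def is_likely_title_or_company (text : String) : Bool :=
  let t := PySem.Str.strip text
  if t = "" ∨ PySem.Str.len t < 2 ∨ PySem.Str.len t > 120 then false
  else
    let lower := PySem.Str.lower t
    pvKeywordsA.any (fun kw => PySem.Str.isIn kw lower)

-- ===== PORT B =====
def pvKeywordBlob : String :=
  "ceo\ncto\ncoo\ncfo\ncmo\nvp\ndirector\nmanager\nengineer\ndeveloper\ndesigner\nanalyst\nconsultant\nfounder\nco-founder\npartner\nlead\nhead\nchief\nspecialist\ncoordinator\nassociate\nintern\nexecutive\npresident\nofficer\nadvisor\nstrategist\narchitect\noperations\nmarketing\nsales\nproduct\ngrowth\nrevenue\naccount\nbusiness\ncustomer\nsuccess\ninc\nllc\nltd\ncorp\ncompany\ngroup\nagency\nsolutions\ntechnologies\nsoftware\ndigital\nmedia\nat \n@ \n|"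

-- _KEYWORD_BLOB.split("\n"); sep is nonempty so split? is always some
def pvKwList : List String := (PySem.Str.split? pvKeywordBlob "\n").getD []

-- _kw[0]; every split keyword is a nonempty literal, so the default is never read
def pvHead (s : String) : Char := s.toList.headD ' '

-- _INDEX[_kw[0]] = _INDEX.get(_kw[0], []) + [_kw]
def pvIndex : PySem.Dict Char (List String) :=
  pvKwList.foldl (fun d kw => d.modify (pvHead kw) [] (· ++ [kw])) PySem.Dict.empty

-- the while loop over suffixes: lower.startswith(kw) = kw prefix of the suffix
def pvScan : List Char → Bool
  | [] => false
  | c :: rest =>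
      (pvIndex.getD c []).any (fun kw => kw.toList.isPrefixOf (c :: rest)) || pvScan rest

def is_likely_title_or_company_alt (text : String) : Bool :=
  let t := PySem.Str.strip text
  if 2 ≤ PySem.Str.len t ∧ PySem.Str.len t ≤ 120 then
    pvScan (PySem.Str.lower t).toList
  else false

-- ===== PRECONDITION & SPEC =====
def Spec_is_likely_title_or_company (text : String) (out : Bool) : Prop := out = is_likely_title_or_company_alt text
instance (text : String) (out : Bool) : Decidable (Spec_is_likely_title_or_company text out) := by unfold Spec_is_likely_title_or_company; infer_instance

-- ===== CLAIM =====
def Claim_equal_is_likely_title_or_company : Prop := ∀ (text : String), Dom_is_likely_title_or_company text → Spec_is_likely_title_or_company text (is_likely_title_or_company text)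

-- ===== LEMMAS AND PROOFS =====

-- the split blob is exactly A's keyword list
set_option maxRecDepth 40000 in
lemma pv_kwlist_eq : pvKwList = pvKeywordsA := by
  unfold pvKwList pvKeywordBlob pvKeywordsA
  decide

-- the two guards are complementary
lemma pv_guard_iff (t : String) :
    (t = "" ∨ PySem.Str.len t < 2 ∨ PySem.Str.len t > 120) ↔
      ¬ (2 ≤ PySem.Str.len t ∧ PySem.Str.len t ≤ 120) := by
  constructor
  · rintro (h | h | h)
    · subst h; simp [PySem.Str.len]
    · omega
    · omega
  · intro h; omega

-- the index lookup returns exactly the keywords whose first character is c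
set_option maxRecDepth 40000 in
lemma pv_lookup (c : Char) :
    pvIndex.getD c [] = pvKwList.filter (fun kw => pvHead kw == c) := by
  unfold pvIndex
  have hmap : (pvKwList.foldl (fun d kw => d.modify (pvHead kw) [] (· ++ [kw])) PySem.Dict.empty)
        = ((pvKwList.map (fun kw => (pvHead kw, kw))).foldl
            (fun d p => d.modify p.1 [] (· ++ [p.2])) PySem.Dict.empty) := by
    simp only [List.foldl_map]
  rw [hmap]
  rw [PySem.Dict.getD_foldl_modify_append]
  simp [List.filter_map, List.map_map, Function.comp_def]

-- a nonempty keyword that is a prefix of c :: rest starts with c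
lemma pv_head_of_prefix (kw : String) (c : Char) (rest : List Char)
    (hne : kw.toList ≠ []) (h : kw.toList.isPrefixOf (c :: rest) = true) :
    pvHead kw = c := by
  rcases hk : kw.toList with _ | ⟨k0, ks⟩
  · exact absurd hk hne
  · rw [hk] at h
    have := List.isPrefixOf_iff_prefix.mp h
    obtain ⟨t, ht⟩ := this
    simp at ht
    simp [pvHead, hk, ht.1]

-- dispatching through the index = trying every keyword, at one suffix
lemma pv_dispatch (c : Char) (rest : List Char) :
    (pvIndex.getD c []).any (fun kw => kw.toList.isPrefixOf (c :: rest)) =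
      pvKwList.any (fun kw => kw.toList.isPrefixOf (c :: rest)) := by
  rw [pv_lookup, List.any_filter]
  apply PySem.List.any_congr_mem
  intro kw hkw
  have hne : kw.toList ≠ [] := by
    rw [pv_kwlist_eq] at hkw; revert kw; decide
  rcases hp : kw.toList.isPrefixOf (c :: rest) with _ | _
  · simp
  · simp [pv_head_of_prefix kw c rest hne hp]

-- the suffix walk finds a keyword iff some keyword occurs as a substring
lemma pv_scan_eq (cs : List Char) :
    pvScan cs = pvKwList.any (fun kw => PySem.Chars.isIn kw.toList cs) := by
  induction cs with
  | nil =>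
      rw [pv_kwlist_eq]; decide
  | cons c rest ih =>
      rw [pvScan, pv_dispatch, ih]
      rcases h : pvKwList.any (fun kw => PySem.Chars.isIn kw.toList (c :: rest)) with _ | _
      · simp only [List.any_eq_false, PySem.Chars.isIn_iff_infix] at h
        simp only [Bool.or_eq_false_iff, List.any_eq_false, PySem.Chars.isIn_iff_infix]
        refine ⟨fun kw hkw hp => h kw hkw ?_, fun kw hkw hs => h kw hkw ?_⟩
        · exact List.infix_cons_iff.mpr (Or.inl (List.isPrefixOf_iff_prefix.mp (by simpa using hp)))
        · exact List.infix_cons_iff.mpr (Or.inr (by simpa using hs))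
      · simp only [List.any_eq_true, PySem.Chars.isIn_iff_infix] at h
        obtain ⟨kw, hkw, hin⟩ := h
        rw [Bool.or_eq_true_iff]
        rcases List.infix_cons_iff.mp hin with hp | hs
        · exact Or.inl (List.any_eq_true.mpr ⟨kw, hkw, List.isPrefixOf_iff_prefix.mpr hp⟩)
        · exact Or.inr (List.any_eq_true.mpr ⟨kw, hkw, by
            rw [PySem.Chars.isIn_iff_infix]; exact hs⟩)

-- ===== VERDICT =====
theorem is_likely_title_or_company_spec : Claim_equal_is_likely_title_or_company := by
  intro text _
  unfold Spec_is_likely_title_or_company is_likely_title_or_company is_likely_title_or_company_alt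
  simp only
  rw [if_congr (pv_guard_iff (PySem.Str.strip text)) rfl rfl]
  rcases Decidable.em (2 ≤ PySem.Str.len (PySem.Str.strip text) ∧
      PySem.Str.len (PySem.Str.strip text) ≤ 120) with hg | hg
  · rw [if_neg (not_not.mpr hg), if_pos hg, pv_scan_eq, pv_kwlist_eq]
    simp [PySem.Str.isIn]
  · rw [if_pos hg, if_neg hg]
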